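-- pv_equiv track=rewrite | github.com/Amospk2/URI | URI_Questao_Criptografia.py | trata_string
-- ===== SOURCE A (Python) =====
-- def trata_string(string):
--   lista = []
--
--   for letra in string:
--     lista.append(letra)
--
--
--   for count, item in enumerate(lista):
--     lettle_replace = chr(ord(item)+3)
--     if item.isalpha():
--       lista[count] = lettle_replace
--
--   lista.reverse()
--   tamanho = int(len(string)/2)
--
--   while(tamanho < len(lista)):
--     lettle_replace = chr(ord(lista[tamanho])-1)
--     lista[tamanho] = lettle_replace
--     tamanho+=1
--
--   return ''.join(lista)
-- ===== SOURCE B (Python) =====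
-- def trata_string(string):
--     n = len(string)
--     h = n // 2
--     out = []
--     for i in range(n):
--         c = string[n - 1 - i]
--         t = chr(ord(c) + 3) if c.isalpha() else c
--         out.append(chr(ord(t) - 1) if i >= h else t)
--     return ''.join(out)
-- ===== Notes on version B (the rewrite author's own statement) =====
-- stated objective: simpler
-- what changed: Replaces A's build/shift/reverse/in-place-suffix-decrement pipeline by a single forward pass over output indices that reads the mirrored input character and applies both shifts at once.
import Mathlib
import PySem

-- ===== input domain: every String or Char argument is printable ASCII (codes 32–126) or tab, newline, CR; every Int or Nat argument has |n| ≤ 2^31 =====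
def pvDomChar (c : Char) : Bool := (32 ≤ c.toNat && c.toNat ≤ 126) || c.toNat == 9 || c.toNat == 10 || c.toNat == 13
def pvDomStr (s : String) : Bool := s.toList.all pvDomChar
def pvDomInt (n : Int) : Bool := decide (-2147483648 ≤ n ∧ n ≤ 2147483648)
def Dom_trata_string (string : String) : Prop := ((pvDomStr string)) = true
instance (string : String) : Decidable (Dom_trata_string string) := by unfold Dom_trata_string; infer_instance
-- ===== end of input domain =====

-- B replaces A's build/shift/reverse/in-place-suffix-decrement pipeline by one forward
-- index-mapped pass (objective: simpler); return values proved equal on all strings in Dom.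

-- ===== PORT A =====
-- the while loop: decrement positions t, t+1, … of lista in place
def pvDecLoop (l : List Char) (t : Nat) : List Char :=
  if h : t < l.length then
    pvDecLoop (l.set t (Char.ofNat (l[t].toNat - 1))) (t + 1)
  else l
termination_by l.length - t
decreasing_by simp_all; omega

def trata_string (string : String) : String :=
  -- first loop: copy the characters into lista
  let lista := string.toList
  -- second loop: shift alphabetic characters by +3 (index-wise replacement)
  let lista := lista.map (fun item =>
    let lettle_replace := Char.ofNat (item.toNat + 3)
    if PySem.Chars.isalpha item then lettle_replace else item)
  -- lista.reverse(); tamanho = int(len(string)/2); while loop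
  let lista := lista.reverse
  let tamanho := string.toList.length / 2
  String.mk (pvDecLoop lista tamanho)

-- ===== PORT B =====
def trata_string_alt (string : String) : String :=
  let cs := string.toList
  let n := cs.length
  let h := n / 2
  String.mk ((List.range n).map (fun i =>
    let c := cs.getD (n - 1 - i) ' '      -- string[n-1-i]; index always in range
    let t := if PySem.Chars.isalpha c then Char.ofNat (c.toNat + 3) else c
    if h ≤ i then Char.ofNat (t.toNat - 1) else t))

-- ===== PRECONDITION & SPEC =====
def Spec_trata_string (string : String) (out : String) : Prop := out = trata_string_alt string
instance (string : String) (out : String) : Decidable (Spec_trata_string string out) := by unfold Spec_trata_string; infer_instance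

-- ===== CLAIM (what is proved, stated in full; the proofs are below) =====
def Claim_equal_trata_string : Prop := ∀ (string : String), Dom_trata_string string → Spec_trata_string string (trata_string string)

-- ===== LEMMAS AND PROOFS =====

theorem pvDecLoop_eq (l : List Char) (t : Nat) :
    pvDecLoop l t = l.take t ++ (l.drop t).map (fun c => Char.ofNat (c.toNat - 1)) := by
  fun_induction pvDecLoop l t with
  | case1 l t h ih =>
    have hset : l.set t (Char.ofNat (l[t].toNat - 1))
        = l.take t ++ Char.ofNat (l[t].toNat - 1) :: l.drop (t + 1) := by
      rw [List.set_eq_take_append_cons_drop, if_pos h]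
    rw [ih, hset, List.take_append, List.drop_append, List.drop_eq_getElem_cons h]
    simp only [List.length_take, Nat.min_eq_left (Nat.le_of_lt h), List.take_take,
      show min (t + 1) t = t from by omega, show t + 1 - t = 1 from by omega,
      List.take_succ_cons, List.take_zero, List.drop_succ_cons, List.drop_zero,
      List.map_cons, List.map_append]
    rw [List.drop_eq_nil_of_le (by simp [Nat.min_eq_left (Nat.le_of_lt h)] :
        (l.take t).length ≤ t + 1)]
    simp
  | case2 l t h =>
    rw [List.drop_eq_nil_of_le (Nat.le_of_not_lt h),
        List.take_of_length_le (Nat.le_of_not_lt h)]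
    simp

theorem range_map_eq (L : List Char) (k : Nat) (hk : k ≤ L.length) :
    (List.range L.length).map (fun i =>
        if k ≤ i then Char.ofNat ((L.getD i ' ').toNat - 1) else L.getD i ' ')
      = L.take k ++ (L.drop k).map (fun c => Char.ofNat (c.toNat - 1)) := by
  apply List.ext_getElem
  · simp; omega
  · intro j hj1 hj2
    have hjL : j < L.length := by simpa using hj1
    simp only [List.getElem_map, List.getElem_range, List.getD_eq_getElem L ' ' hjL]
    rw [List.getElem_append]
    by_cases hkj : j < k
    · rw [dif_pos (by simp [Nat.min_eq_left hk]; omega), if_neg (by omega),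
          List.getElem_take]
    · rw [dif_neg (by simp [Nat.min_eq_left hk]; omega), if_pos (by omega)]
      simp only [List.getElem_map, List.getElem_drop]
      have hidx : k + (j - (L.take k).length) = j := by
        simp [Nat.min_eq_left hk]; omega
      congr 1
      simp only [hidx]

-- ===== VERDICT (by name: the statement is the Claim_ definition above) =====
theorem trata_string_spec : Claim_equal_trata_string := by
  intro s _
  unfold Spec_trata_string trata_string trata_string_alt
  dsimp only
  set f : Char → Char :=
    fun item => if PySem.Chars.isalpha item = true then Char.ofNat (item.toNat + 3) else item
    with hf
  set cs := s.toList with hcs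
  set n := cs.length with hn
  set M := (cs.map f).reverse with hM
  have hlen : M.length = n := by simp [hM, hn]
  have h2 : n / 2 ≤ M.length := by rw [hlen]; exact Nat.div_le_self n 2
  have key : ∀ i, i < n → (if PySem.Chars.isalpha (cs.getD (n - 1 - i) ' ') = true then
      Char.ofNat ((cs.getD (n - 1 - i) ' ').toNat + 3) else cs.getD (n - 1 - i) ' ')
      = M.getD i ' ' := by
    intro i hi
    have h1 : n - 1 - i < cs.length := by rw [← hn]; omega
    have hMi : M[i]? = some (f (cs.getD (n - 1 - i) ' ')) := by
      rw [List.getD_eq_getElem cs ' ' h1, hM,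
          List.getElem?_reverse (by simpa [hn] using hi),
          List.getElem?_map, List.length_map,
          List.getElem?_eq_getElem (by omega : cs.length - 1 - i < cs.length)]
      simp only [Option.map_some, Option.some.injEq]
      congr 2
    conv_rhs => rw [List.getD_eq_getElem?_getD, hMi]
    simp [hf]
  have main : (List.range n).map (fun i =>
        if n / 2 ≤ i then
          Char.ofNat ((if PySem.Chars.isalpha (cs.getD (n - 1 - i) ' ') = true then
              Char.ofNat ((cs.getD (n - 1 - i) ' ').toNat + 3) else cs.getD (n - 1 - i) ' ').toNat - 1)
        else
          (if PySem.Chars.isalpha (cs.getD (n - 1 - i) ' ') = true then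
              Char.ofNat ((cs.getD (n - 1 - i) ' ').toNat + 3) else cs.getD (n - 1 - i) ' '))
      = M.take (n / 2) ++ (M.drop (n / 2)).map (fun c => Char.ofNat (c.toNat - 1)) := by
    rw [← range_map_eq M (n / 2) h2, hlen]
    apply List.map_congr_left
    intro i hi
    rw [key i (List.mem_range.mp hi)]
  rw [pvDecLoop_eq]
  exact congrArg String.mk main.symm
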